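-- pv_equiv track=rewrite | github.com/hanukathas/CodingRevisions | arrays/diet_plan.py | diet_plan_revision
-- ===== SOURCE A (Python) =====
-- def diet_plan_revision(arr:list, size: int, upper: int, lower: int):
--     running_sum = sum(arr[:size])
--
--     performance = 0
--     if running_sum < lower:
--         performance -= 1
--     elif running_sum > upper:
--         performance += 1
--
--
--     for i in range(size, len(arr)):
--         running_sum = running_sum - arr[i - size] + arr[i]
--
--         if running_sum < lower:
--             performance -= 1
--         elif running_sum > upper:
--             performance += 1
--
--     return performance
-- ===== SOURCE B (Python) =====
-- def diet_plan_revision(arr: list, size: int, upper: int, lower: int):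
--     # Prefix-sum table: each window sum is a difference of two prefix sums.
--     P = [0]
--     for x in arr:
--         P.append(P[-1] + x)
--     n = len(arr)
--
--     s = P[min(size, n)]
--     performance = 0
--     if s < lower:
--         performance -= 1
--     elif s > upper:
--         performance += 1
--
--     for i in range(size, n):
--         s = P[i + 1] - P[i - size + 1]
--         if s < lower:
--             performance -= 1
--         elif s > upper:
--             performance += 1
--
--     return performance
-- ===== Notes on version B (the rewrite author's own statement) =====
-- stated objective: alternative
-- what changed: B precomputes a prefix-sum table and derives each window sum as a difference of two prefix entries, instead of A's incrementally maintained running window sum.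
import Mathlib
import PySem

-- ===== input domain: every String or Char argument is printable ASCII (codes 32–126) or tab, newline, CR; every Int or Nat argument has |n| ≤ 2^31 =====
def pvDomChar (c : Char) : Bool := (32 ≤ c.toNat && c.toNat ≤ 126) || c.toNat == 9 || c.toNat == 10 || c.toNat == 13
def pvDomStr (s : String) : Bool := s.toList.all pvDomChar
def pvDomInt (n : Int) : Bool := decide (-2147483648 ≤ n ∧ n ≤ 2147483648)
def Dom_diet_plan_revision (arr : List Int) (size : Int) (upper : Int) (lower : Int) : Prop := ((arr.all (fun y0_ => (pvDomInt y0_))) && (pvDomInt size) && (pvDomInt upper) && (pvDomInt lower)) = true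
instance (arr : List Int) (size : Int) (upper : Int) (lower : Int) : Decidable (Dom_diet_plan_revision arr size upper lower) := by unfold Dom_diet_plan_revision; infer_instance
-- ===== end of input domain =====

-- B replaces A's incrementally maintained sliding window sum by a prefix-sum table,
-- reading each window sum off as a difference of two prefix entries (objective: alternative).

-- ===== PORT A =====
def diet_plan_revision (arr : List Int) (size : Int) (upper : Int) (lower : Int) : Int :=
  let running_sum := (PySem.List.slice arr none (some size)).sum
  let performance : Int :=
    if running_sum < lower then (0 : Int) - 1
    else if running_sum > upper then (0 : Int) + 1
    else 0
  let st := (PySem.List.pyRange size (arr.length : Int) 1).foldl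
    (fun (st : Int × Int) i =>
      let rs := st.1 - PySem.List.pyGetD arr (i - size) 0 + PySem.List.pyGetD arr i 0
      (rs, if rs < lower then st.2 - 1 else if rs > upper then st.2 + 1 else st.2))
    (running_sum, performance)
  st.2

-- ===== PORT B =====
def diet_plan_revision_alt (arr : List Int) (size : Int) (upper : Int) (lower : Int) : Int :=
  let P := arr.foldl (fun p x => p ++ [PySem.List.pyGetD p (-1) 0 + x]) [0]
  let n : Int := (arr.length : Int)
  let s := PySem.List.pyGetD P (min size n) 0
  let performance : Int :=
    if s < lower then (0 : Int) - 1
    else if s > upper then (0 : Int) + 1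
    else 0
  (PySem.List.pyRange size n 1).foldl
    (fun perf i =>
      let s := PySem.List.pyGetD P (i + 1) 0 - PySem.List.pyGetD P (i - size + 1) 0
      if s < lower then perf - 1 else if s > upper then perf + 1 else perf)
    performance

-- ===== PRECONDITION & SPEC =====
-- Pre_ excludes exactly negative sizes, on which Python A raises IndexError (arr[i - size]
-- goes past the end on the last loop iteration).
def Pre_diet_plan_revision (arr : List Int) (size : Int) (upper : Int) (lower : Int) : Prop :=
  0 ≤ size
instance (arr : List Int) (size : Int) (upper : Int) (lower : Int) : Decidable (Pre_diet_plan_revision arr size upper lower) := by unfold Pre_diet_plan_revision; infer_instance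

def pvWitness_diet_plan_revision : List Int × Int × Int × Int := ([1, 2, 3, 4], 2, 6, 3)

def Spec_diet_plan_revision (arr : List Int) (size : Int) (upper : Int) (lower : Int) (out : Int) : Prop := out = diet_plan_revision_alt arr size upper lower
instance (arr : List Int) (size : Int) (upper : Int) (lower : Int) (out : Int) : Decidable (Spec_diet_plan_revision arr size upper lower out) := by unfold Spec_diet_plan_revision; infer_instance

-- ===== CLAIM (what is proved, stated in full; the proofs are below) =====
def Claim_equal_diet_plan_revision : Prop := ∀ (arr : List Int) (size : Int) (upper : Int) (lower : Int), Dom_diet_plan_revision arr size upper lower → Pre_diet_plan_revision arr size upper lower → Spec_diet_plan_revision arr size upper lower (diet_plan_revision arr size upper lower)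

-- ===== LEMMAS AND PROOFS =====

-- prefix sum of the first k elements
def pvS (arr : List Int) (k : Nat) : Int := (arr.take k).sum

theorem pvS_succ (arr : List Int) (k : Nat) (hk : k < arr.length) :
    pvS arr (k + 1) = pvS arr k + arr[k] := by
  unfold pvS
  exact List.sum_take_succ arr k hk

-- the built list P is the table of prefix sums
theorem pvP_fold (arr : List Int) (q : List Int) (c : Int) :
    arr.foldl (fun p x => p ++ [PySem.List.pyGetD p (-1) 0 + x]) (q ++ [c]) =
      q ++ [c] ++ (List.range arr.length).map (fun k => c + (arr.take (k + 1)).sum) := by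
  induction arr generalizing q c with
  | nil => simp
  | cons x arr ih =>
    simp only [List.foldl_cons, PySem.List.pyGetD_neg_one_append_singleton]
    rw [ih (q ++ [c]) (c + x)]
    have hmap : List.map (fun k => (c + x) + (arr.take (k + 1)).sum) (List.range arr.length)
        = List.map ((fun k => c + ((x :: arr).take (k + 1)).sum) ∘ (· + 1)) (List.range arr.length) := by
      apply List.map_congr_left
      intro k _
      simp [List.take_succ_cons]
      ring
    rw [hmap, ← List.map_map]
    simp [List.range_succ_eq_map, List.map_map, List.take_succ_cons]

theorem pvP_eq (arr : List Int) :
    arr.foldl (fun p x => p ++ [PySem.List.pyGetD p (-1) 0 + x]) [0] =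
      (List.range (arr.length + 1)).map (fun k => pvS arr k) := by
  have h := pvP_fold arr [] 0
  simp only [List.nil_append] at h
  rw [h]
  simp only [List.range_succ_eq_map, List.map_cons, List.map_map]
  simp [pvS, Function.comp]

-- indexing into P
theorem pvP_get (arr : List Int) (k : Nat) (hk : k ≤ arr.length) :
    PySem.List.pyGetD ((List.range (arr.length + 1)).map (fun j => pvS arr j)) ((k : Nat) : Int) 0
      = pvS arr k := by
  rw [PySem.List.pyGetD_natCast]
  rw [List.getD_eq_getElem?_getD]
  simp [List.getElem?_map, List.getElem?_range (by omega : k < arr.length + 1)]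

-- the two loops agree, given the running-sum invariant
theorem pvLoop (arr : List Int) (size upper lower : Int) (hs : 0 ≤ size)
    (a : Nat) (ha : size ≤ (a : Int)) (perf : Int) :
    ((PySem.List.pyRange (a : Int) (arr.length : Int) 1).foldl
      (fun (st : Int × Int) i =>
        let rs := st.1 - PySem.List.pyGetD arr (i - size) 0 + PySem.List.pyGetD arr i 0
        (rs, if rs < lower then st.2 - 1 else if rs > upper then st.2 + 1 else st.2))
      (pvS arr a - pvS arr (a - size.toNat), perf)).2
    =
    (PySem.List.pyRange (a : Int) (arr.length : Int) 1).foldl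
      (fun perf i =>
        let s := PySem.List.pyGetD ((List.range (arr.length + 1)).map (fun j => pvS arr j)) (i + 1) 0
               - PySem.List.pyGetD ((List.range (arr.length + 1)).map (fun j => pvS arr j)) (i - size + 1) 0
        if s < lower then perf - 1 else if s > upper then perf + 1 else perf)
      perf := by
  by_cases hle : arr.length ≤ a
  · rw [PySem.List.pyRange_one_eq_nil (by exact_mod_cast hle)]
    simp
  · push_neg at hle
    rw [PySem.List.pyRange_one_cons (by exact_mod_cast hle)]
    simp only [List.foldl_cons]
    have hsz : size = (size.toNat : Int) := (Int.toNat_of_nonneg hs).symm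
    have hsa : size.toNat ≤ a := by omega
    -- A's new running sum
    have hidx1 : (a : Int) - size = ((a - size.toNat : Nat) : Int) := by omega
    have hA1 : PySem.List.pyGetD arr ((a : Int) - size) 0 = arr[a - size.toNat]'(by omega) := by
      rw [hidx1, PySem.List.pyGetD_natCast, List.getD_eq_getElem?_getD,
        List.getElem?_eq_getElem (by omega)]
      rfl
    have hA2 : PySem.List.pyGetD arr ((a : Int)) 0 = arr[a]'hle := by
      rw [PySem.List.pyGetD_natCast, List.getD_eq_getElem?_getD,
        List.getElem?_eq_getElem hle]
      rfl
    have hrs : pvS arr a - pvS arr (a - size.toNat)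
        - PySem.List.pyGetD arr ((a : Int) - size) 0 + PySem.List.pyGetD arr ((a : Int)) 0
        = pvS arr (a + 1) - pvS arr (a + 1 - size.toNat) := by
      rw [hA1, hA2, pvS_succ arr a hle,
        show a + 1 - size.toNat = (a - size.toNat) + 1 by omega,
        pvS_succ arr (a - size.toNat) (by omega)]
      ring
    -- B's window sum
    have hB1 : PySem.List.pyGetD ((List.range (arr.length + 1)).map (fun j => pvS arr j)) ((a : Int) + 1) 0
        = pvS arr (a + 1) := by
      rw [show ((a : Int) + 1) = ((a + 1 : Nat) : Int) by omega]
      exact pvP_get arr (a + 1) (by omega)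
    have hB2 : PySem.List.pyGetD ((List.range (arr.length + 1)).map (fun j => pvS arr j)) ((a : Int) - size + 1) 0
        = pvS arr (a + 1 - size.toNat) := by
      rw [show ((a : Int) - size + 1) = ((a + 1 - size.toNat : Nat) : Int) by omega]
      exact pvP_get arr (a + 1 - size.toNat) (by omega)
    have hrec := pvLoop arr size upper lower hs (a + 1) (by omega)
      (if pvS arr (a + 1) - pvS arr (a + 1 - size.toNat) < lower then perf - 1
       else if pvS arr (a + 1) - pvS arr (a + 1 - size.toNat) > upper then perf + 1 else perf)
    simp only at hrec ⊢
    rw [hrs, hB1, hB2]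
    rw [show ((a : Int) + 1) = ((a + 1 : Nat) : Int) by omega]
    exact hrec
termination_by arr.length - a

-- ===== VERDICT (by name: the statement is the Claim_ definition above) =====
theorem diet_plan_revision_spec : Claim_equal_diet_plan_revision := by
  intro arr size upper lower _ hpre
  unfold Spec_diet_plan_revision diet_plan_revision diet_plan_revision_alt
  simp only []
  rw [pvP_eq arr]
  have hs : 0 ≤ size := hpre
  -- the two initial window sums agree
  have hinit : (PySem.List.slice arr none (some size)).sum
      = PySem.List.pyGetD ((List.range (arr.length + 1)).map (fun j => pvS arr j))
          (min size (arr.length : Int)) 0 := by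
    rw [PySem.List.slice_to arr hs]
    have hmin : min size (arr.length : Int) = ((min size.toNat arr.length : Nat) : Int) := by
      omega
    rw [hmin, pvP_get arr _ (by omega)]
    unfold pvS
    rcases Nat.le_total size.toNat arr.length with h | h
    · rw [Nat.min_eq_left h]
    · rw [Nat.min_eq_right h, List.take_of_length_le h, List.take_of_length_le (by omega)]
  rw [hinit]
  have hS0 : (PySem.List.pyGetD ((List.range (arr.length + 1)).map (fun j => pvS arr j))
      (min size (arr.length : Int)) 0) = pvS arr size.toNat - pvS arr (size.toNat - size.toNat) := by
    have hmin : min size (arr.length : Int) = ((min size.toNat arr.length : Nat) : Int) := by omega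
    rw [hmin, pvP_get arr _ (by omega)]
    simp only [Nat.sub_self]
    unfold pvS
    simp only [List.take_zero, List.sum_nil, sub_zero]
    rcases Nat.le_total size.toNat arr.length with h | h
    · rw [Nat.min_eq_left h]
    · rw [Nat.min_eq_right h, List.take_of_length_le h, List.take_of_length_le (by omega)]
  have := pvLoop arr size upper lower hs size.toNat (by omega)
    (if PySem.List.pyGetD ((List.range (arr.length + 1)).map (fun j => pvS arr j))
        (min size (arr.length : Int)) 0 < lower then (0 : Int) - 1
     else if PySem.List.pyGetD ((List.range (arr.length + 1)).map (fun j => pvS arr j))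
        (min size (arr.length : Int)) 0 > upper then (0 : Int) + 1 else 0)
  rw [hS0] at this ⊢
  rw [show ((size.toNat : Nat) : Int) = size by omega] at this
  exact this
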